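-- pv_equiv track=rewrite | github.com/mach-hub-g1/ACC45DAYSOFCODE-2024 | Day25-MAXTASTE.py | maximize_tastiness
-- ===== SOURCE A (Python) =====
-- def maximize_tastiness(test_cases):
--     results = []
--     for a, b, c, d in test_cases:
--         # Calculate all combinations of tastiness
--         tastiness1 = a + c
--         tastiness2 = a + d
--         tastiness3 = b + c
--         tastiness4 = b + d
--
--         # Find the maximum tastiness
--         max_tastiness = max(tastiness1, tastiness2, tastiness3, tastiness4)
--
--         # Store the result
--         results.append(max_tastiness)
--
--     return results
-- ===== SOURCE B (Python) =====
-- def maximize_tastiness(test_cases):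
--     return [max(a, b) + max(c, d) for a, b, c, d in test_cases]
-- ===== Notes on version B (the rewrite author's own statement) =====
-- stated objective: simpler
-- what changed: Replaces forming all four pair sums and taking their maximum with the factored closed form max(a,b)+max(c,d) in a single list comprehension.
import Mathlib
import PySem

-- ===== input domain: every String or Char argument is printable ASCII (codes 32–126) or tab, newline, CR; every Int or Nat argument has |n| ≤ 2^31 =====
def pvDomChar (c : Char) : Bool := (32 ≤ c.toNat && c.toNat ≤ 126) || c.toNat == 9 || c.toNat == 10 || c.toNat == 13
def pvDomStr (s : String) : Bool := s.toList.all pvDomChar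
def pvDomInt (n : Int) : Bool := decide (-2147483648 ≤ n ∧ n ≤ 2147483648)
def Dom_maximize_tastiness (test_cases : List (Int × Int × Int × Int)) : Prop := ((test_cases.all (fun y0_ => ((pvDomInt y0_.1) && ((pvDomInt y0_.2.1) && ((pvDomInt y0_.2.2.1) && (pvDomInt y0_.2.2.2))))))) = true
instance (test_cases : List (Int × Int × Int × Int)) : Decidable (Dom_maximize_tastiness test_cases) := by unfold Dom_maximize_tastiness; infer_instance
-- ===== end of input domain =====

-- B replaces the four explicit pair sums and 4-way max with the factored form max(a,b)+max(c,d); objective: simpler.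


-- ===== PORT A =====
-- loop appending max of the four pair sums
def maximize_tastiness (test_cases : List (Int × Int × Int × Int)) : List Int :=
  test_cases.foldl (fun results tc =>
    let a := tc.1; let b := tc.2.1; let c := tc.2.2.1; let d := tc.2.2.2
    let tastiness1 := a + c
    let tastiness2 := a + d
    let tastiness3 := b + c
    let tastiness4 := b + d
    let max_tastiness := max (max (max tastiness1 tastiness2) tastiness3) tastiness4
    results ++ [max_tastiness]) []

-- ===== PORT B =====
def maximize_tastiness_alt (test_cases : List (Int × Int × Int × Int)) : List Int :=
  test_cases.map (fun tc => max tc.1 tc.2.1 + max tc.2.2.1 tc.2.2.2)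

-- ===== PRECONDITION & SPEC =====
def Spec_maximize_tastiness (test_cases : List (Int × Int × Int × Int)) (out : List Int) : Prop := out = maximize_tastiness_alt test_cases
instance (test_cases : List (Int × Int × Int × Int)) (out : List Int) : Decidable (Spec_maximize_tastiness test_cases out) := by unfold Spec_maximize_tastiness; infer_instance

-- ===== CLAIM (what is proved, stated in full; the proofs are below) =====
def Claim_equal_maximize_tastiness : Prop := ∀ (test_cases : List (Int × Int × Int × Int)), Dom_maximize_tastiness test_cases → Spec_maximize_tastiness test_cases (maximize_tastiness test_cases)

-- ===== LEMMAS AND PROOFS =====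

theorem maximize_tastiness_foldl (acc : List Int) (tcs : List (Int × Int × Int × Int)) :
    tcs.foldl (fun results tc =>
      let a := tc.1; let b := tc.2.1; let c := tc.2.2.1; let d := tc.2.2.2
      let tastiness1 := a + c
      let tastiness2 := a + d
      let tastiness3 := b + c
      let tastiness4 := b + d
      let max_tastiness := max (max (max tastiness1 tastiness2) tastiness3) tastiness4
      results ++ [max_tastiness]) acc
    = acc ++ tcs.map (fun tc => max tc.1 tc.2.1 + max tc.2.2.1 tc.2.2.2) := by
  induction tcs generalizing acc with
  | nil => simp
  | cons hd tl ih =>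
    simp only [List.foldl_cons, List.map_cons, ih]
    have : max (max (max (hd.1 + hd.2.2.1) (hd.1 + hd.2.2.2)) (hd.2.1 + hd.2.2.1)) (hd.2.1 + hd.2.2.2)
        = max hd.1 hd.2.1 + max hd.2.2.1 hd.2.2.2 := by
      rcases hd with ⟨a, b, c, d⟩
      simp only [Int.max_def]
      split_ifs <;> omega
    simp [this]

-- ===== VERDICT (by name: the statement is the Claim_ definition above) =====
theorem maximize_tastiness_spec : Claim_equal_maximize_tastiness := by
  intro tcs _
  unfold Spec_maximize_tastiness maximize_tastiness maximize_tastiness_alt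
  simpa using maximize_tastiness_foldl [] tcs
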